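-- pv_equiv track=rewrite | github.com/joaaomaia/vassoura | vassoura/utils.py | _remove_id_columns
-- ===== SOURCE A (Python) =====
-- from typing import List, Optional, Tuple
--
-- def _remove_id_columns(
--     num_cols: List[str],
--     cat_cols: List[str],
--     id_patterns: List[str],
-- ) -> Tuple[List[str], List[str]]:
--     """Remove colunas identificadas como ID das listas *in‑place*."""
--
--     def _filter(col_list: List[str]) -> List[str]:
--         return [c for c in col_list if not any(p in c.lower() for p in id_patterns)]
--
--     return _filter(num_cols), _filter(cat_cols)
-- ===== SOURCE B (Python) =====
-- from typing import List, Tuple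
--
-- def _remove_id_columns(
--     num_cols: List[str],
--     cat_cols: List[str],
--     id_patterns: List[str],
-- ) -> Tuple[List[str], List[str]]:
--     """Remove ID-like columns: lowercase each column once, then eliminate
--     matches pattern by pattern (successive sieve) instead of testing every
--     pattern against every column in an inner any()."""
--
--     def _keep(cols: List[str]) -> List[str]:
--         pairs = [(c, c.lower()) for c in cols]
--         for p in id_patterns:
--             pairs = [cl for cl in pairs if p not in cl[1]]
--         return [c for c, _ in pairs]
--
--     return _keep(num_cols), _keep(cat_cols)
-- ===== Notes on version B (the rewrite author's own statement) =====
-- stated objective: alternative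
-- what changed: Instead of a column-major comprehension with an inner any(p in c.lower()), B lowercases each column once into (column, lowered) pairs and then sieves the list pattern by pattern, dropping matching pairs in successive passes before projecting the survivors.
import Mathlib
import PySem

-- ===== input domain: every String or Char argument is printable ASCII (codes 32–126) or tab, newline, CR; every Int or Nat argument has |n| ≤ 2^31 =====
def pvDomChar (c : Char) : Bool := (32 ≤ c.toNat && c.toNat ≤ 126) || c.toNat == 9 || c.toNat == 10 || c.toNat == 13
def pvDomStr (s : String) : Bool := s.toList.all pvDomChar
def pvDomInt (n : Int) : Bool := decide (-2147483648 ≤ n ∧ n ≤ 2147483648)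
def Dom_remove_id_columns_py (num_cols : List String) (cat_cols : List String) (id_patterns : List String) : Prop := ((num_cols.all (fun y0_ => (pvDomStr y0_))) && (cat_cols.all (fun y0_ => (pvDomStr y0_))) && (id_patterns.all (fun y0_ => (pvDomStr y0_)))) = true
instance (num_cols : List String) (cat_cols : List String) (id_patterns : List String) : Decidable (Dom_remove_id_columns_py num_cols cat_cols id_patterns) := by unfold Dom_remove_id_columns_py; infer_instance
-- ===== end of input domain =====

-- B lowercases each column once into (column, lowered) pairs and sieves them pattern by
-- pattern (successive per-pattern filters) instead of A's column-major comprehension with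
-- an inner any(); alternative decomposition, same exact result.


-- ===== PORT A =====
-- _filter: [c for c in col_list if not any(p in c.lower() for p in id_patterns)]
def pvAFilter (id_patterns : List String) (col_list : List String) : List String :=
  col_list.filter (fun c =>
    !(id_patterns.any (fun p => PySem.Str.isIn p (PySem.Str.lower c))))

def remove_id_columns_py (num_cols : List String) (cat_cols : List String) (id_patterns : List String) : List String × List String :=
  (pvAFilter id_patterns num_cols, pvAFilter id_patterns cat_cols)

-- ===== PORT B =====
-- _keep: pairs = [(c, c.lower()) ...]; for p: pairs = [cl for cl in pairs if p not in cl[1]]; return [c for c,_ in pairs]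
def pvBKeep (id_patterns : List String) (cols : List String) : List String :=
  let pairs := cols.map (fun c => (c, PySem.Str.lower c))
  let final := id_patterns.foldl
    (fun acc p => acc.filter (fun cl => !(PySem.Str.isIn p cl.2))) pairs
  final.map (fun cl => cl.1)

def remove_id_columns_py_alt (num_cols : List String) (cat_cols : List String) (id_patterns : List String) : List String × List String :=
  (pvBKeep id_patterns num_cols, pvBKeep id_patterns cat_cols)

-- ===== PRECONDITION & SPEC =====
def Spec_remove_id_columns_py (num_cols : List String) (cat_cols : List String) (id_patterns : List String) (out : List String × List String) : Prop := out = remove_id_columns_py_alt num_cols cat_cols id_patterns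
instance (num_cols : List String) (cat_cols : List String) (id_patterns : List String) (out : List String × List String) : Decidable (Spec_remove_id_columns_py num_cols cat_cols id_patterns out) := by unfold Spec_remove_id_columns_py; infer_instance

-- ===== CLAIM (what is proved, stated in full; the proofs are below) =====
def Claim_equal_remove_id_columns_py : Prop := ∀ (num_cols : List String) (cat_cols : List String) (id_patterns : List String), Dom_remove_id_columns_py num_cols cat_cols id_patterns → Spec_remove_id_columns_py num_cols cat_cols id_patterns (remove_id_columns_py num_cols cat_cols id_patterns)

-- ===== LEMMAS AND PROOFS =====

-- a fold of successive filters is one filter by the conjunction of the tests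
theorem foldl_filter_eq_filter_all {α β : Type} (ps : List β) (q : β → α → Bool)
    (xs : List α) :
    ps.foldl (fun acc p => acc.filter (fun x => !(q p x))) xs
      = xs.filter (fun x => !(ps.any (fun p => q p x))) := by
  induction ps generalizing xs with
  | nil => simp
  | cons p ps ih =>
      simp only [List.foldl_cons, ih, List.filter_filter]
      apply List.filter_congr
      intro x _
      cases h : q p x <;> simp [h]

theorem pvBKeep_eq_pvAFilter (id_patterns : List String) (cols : List String) :
    pvBKeep id_patterns cols = pvAFilter id_patterns cols := by
  simp only [pvBKeep, pvAFilter]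
  rw [foldl_filter_eq_filter_all, List.filter_map, List.map_map]
  simp [Function.comp_def]

-- ===== VERDICT (by name: the statement is the Claim_ definition above) =====
theorem remove_id_columns_py_spec : Claim_equal_remove_id_columns_py := by
  intro num_cols cat_cols id_patterns _
  show _ = _
  simp [remove_id_columns_py, remove_id_columns_py_alt, pvBKeep_eq_pvAFilter]
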